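-- pv_equiv track=rewrite | github.com/platanus-hack/platanus-hack-25-team-16 | input_validation/sanitizers.py | sanitize_shell
-- ===== SOURCE A (Python) =====
-- def sanitize_shell(value: str) -> str:
--     """
--     Sanitize input to prevent command injection.
--
--     Args:
--         value: Input string to sanitize
--
--     Returns:
--         Sanitized string
--     """
--     if not isinstance(value, str):
--         return value
--
--     # Remove shell metacharacters
--     dangerous_chars = ['&', '|', ';', '$', '`', '\n', '\r', '(', ')', '<', '>', '\\']
--     for char in dangerous_chars:
--         value = value.replace(char, '')
--
--     # Remove null bytes
--     value = value.replace('\x00', '')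
--
--     return value
-- ===== SOURCE B (Python) =====
-- def sanitize_shell(value: str) -> str:
--     """Sanitize input to prevent command injection (single-pass filter)."""
--     if not isinstance(value, str):
--         return value
--     removal = {'&', '|', ';', '$', '`', '\n', '\r', '(', ')', '<', '>', '\\', '\x00'}
--     return ''.join(c for c in value if c not in removal)
-- ===== Notes on version B (the rewrite author's own statement) =====
-- stated objective: idiomatic
-- what changed: Replaces thirteen successive full-string str.replace passes with one removal set and a single pass over the string that keeps the characters not in the set.
import Mathlib
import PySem

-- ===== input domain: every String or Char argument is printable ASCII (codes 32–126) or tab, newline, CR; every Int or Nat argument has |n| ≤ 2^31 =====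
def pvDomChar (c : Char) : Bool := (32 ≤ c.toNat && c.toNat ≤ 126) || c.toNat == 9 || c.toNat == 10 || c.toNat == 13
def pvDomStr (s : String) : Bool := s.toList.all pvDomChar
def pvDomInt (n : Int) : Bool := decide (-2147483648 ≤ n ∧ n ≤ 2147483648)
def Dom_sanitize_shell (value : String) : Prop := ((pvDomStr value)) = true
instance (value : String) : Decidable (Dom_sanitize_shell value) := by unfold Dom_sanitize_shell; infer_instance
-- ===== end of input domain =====

-- B strips the same 13 characters in a single pass over the string instead of
-- thirteen successive full-string replace passes; return value only (the
-- isinstance guard is vacuous under the String-typed signature).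

-- ===== PORT A =====
def dangerous_chars : List String := ["&", "|", ";", "$", "`", "\n", "\r", "(", ")", "<", ">", "\\"]

def sanitize_shell (value : String) : String :=
  let value := dangerous_chars.foldl (fun v ch => PySem.Str.replace v ch "") value
  PySem.Str.replace value "\x00" ""

-- ===== PORT B =====
def removalSet : List Char :=
  PySem.Set.ofList ['&', '|', ';', '$', '`', '\n', '\r', '(', ')', '<', '>', '\\', '\x00']

def sanitize_shell_alt (value : String) : String :=
  String.ofList (value.toList.filter (fun c => !removalSet.contains c))

-- ===== PRECONDITION & SPEC =====
def Spec_sanitize_shell (value : String) (out : String) : Prop := out = sanitize_shell_alt value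
instance (value : String) (out : String) : Decidable (Spec_sanitize_shell value out) := by unfold Spec_sanitize_shell; infer_instance

-- ===== CLAIM (what is proved, stated in full; the proofs are below) =====
def Claim_equal_sanitize_shell : Prop := ∀ (value : String), Dom_sanitize_shell value → Spec_sanitize_shell value (sanitize_shell value)

-- ===== LEMMAS AND PROOFS =====

-- replace.go with a one-char pattern and empty replacement is a filter
theorem go_filter (o : Char) : ∀ (fuel : Nat) (l acc : List Char), l.length ≤ fuel →
    PySem.Chars.replace.go [o] [] fuel l acc = acc.reverse ++ l.filter (fun c => c != o) := by
  intro fuel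
  induction fuel with
  | zero =>
    intro l acc h
    cases l with
    | nil => simp [PySem.Chars.replace.go]
    | cons c t => simp at h
  | succ n ih =>
    intro l acc h
    cases l with
    | nil => simp [PySem.Chars.replace.go]
    | cons c t =>
      simp only [PySem.Chars.replace.go]
      by_cases hc : c = o
      · subst hc
        have hp : List.isPrefixOf [c] (c :: t) = true := by simp [List.isPrefixOf]
        rw [if_pos hp]
        simp only [show List.drop (List.length [c]) (c :: t) = t from rfl,
          List.reverse_nil, List.nil_append]
        simp only [List.length_cons] at h
        rw [ih t acc (by omega)]
        simp
      · have hp : List.isPrefixOf [o] (c :: t) = false := by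
          simp [List.isPrefixOf]
          exact fun he => (hc he.symm).elim
        rw [if_neg (by simp [hp])]
        simp only [List.length_cons] at h
        rw [ih t (c :: acc) (by omega)]
        simp [hc]

theorem replace_single (s : List Char) (o : Char) :
    PySem.Chars.replace s [o] [] = s.filter (fun c => c != o) := by
  rw [PySem.Chars.replace]
  simp only [List.isEmpty_cons]
  rw [go_filter o s.length s [] le_rfl]
  simp

-- the fold of single-char replaces over a char list is one filter
theorem foldl_replace_filter (cs : List Char) : ∀ (s : List Char),
    cs.foldl (fun v c => PySem.Chars.replace v [c] []) s
      = s.filter (fun x => !cs.contains x) := by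
  induction cs with
  | nil => intro s; simp
  | cons c t ih =>
    intro s
    simp only [List.foldl_cons]
    rw [replace_single, ih, List.filter_filter]
    apply List.filter_congr
    intro x _
    by_cases hx : x = c <;> simp [hx, bne]

set_option maxHeartbeats 1000000 in
-- ===== VERDICT (by name: the statement is the Claim_ definition above) =====
theorem sanitize_shell_spec : Claim_equal_sanitize_shell := by
  intro value _
  unfold Spec_sanitize_shell sanitize_shell sanitize_shell_alt
  apply String.ext
  simp only [dangerous_chars, List.foldl_cons, List.foldl_nil, PySem.Str.toList_replace,
    String.toList_ofList]
  have h12 := foldl_replace_filter ['&', '|', ';', '$', '`', '\n', '\r', '(', ')', '<', '>', '\\'] value.toList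
  simp only [List.foldl_cons, List.foldl_nil] at h12
  rw [show ("&" : String).toList = ['&'] from rfl]
  rw [show ("|" : String).toList = ['|'] from rfl]
  rw [show (";" : String).toList = [';'] from rfl]
  rw [show ("$" : String).toList = ['$'] from rfl]
  rw [show ("`" : String).toList = ['`'] from rfl]
  rw [show ("\n" : String).toList = ['\n'] from rfl]
  rw [show ("\r" : String).toList = ['\r'] from rfl]
  rw [show ("(" : String).toList = ['('] from rfl]
  rw [show (")" : String).toList = [')'] from rfl]
  rw [show ("<" : String).toList = ['<'] from rfl]
  rw [show (">" : String).toList = ['>'] from rfl]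
  rw [show ("\\" : String).toList = ['\\'] from rfl]
  rw [show ("\x00" : String).toList = ['\x00'] from rfl,
    show ("" : String).toList = [] from rfl, h12, replace_single, List.filter_filter]
  apply List.filter_congr
  intro x _
  have hr : removalSet = ['&', '|', ';', '$', '`', '\n', '\r', '(', ')', '<', '>', '\\'] ++ ['\x00'] := by decide
  rw [hr, List.contains_append]
  simp [Bool.not_or, bne, Bool.and_assoc, Bool.and_comm, Bool.and_left_comm]
  rw [show (x == '\x00') = decide (x = '\x00') from rfl]
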